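-- pv_equiv track=rewrite | github.com/cegis-p-repair/cegis-p-repair | policy_repair_z3_multi_io.py | key_common_prefix_excluding
-- ===== SOURCE A (Python) =====
-- from typing import List, Dict, Tuple, Optional, Set, Any
--
-- def key_common_prefix_excluding(keys_good: List[str], bad_key: str) -> Optional[str]:
--     """Return directory-like prefix p ending with '/' that covers all good keys but excludes bad_key."""
--     if not keys_good:
--         return None
--     common = keys_good[0]
--     for k in keys_good[1:]:
--         while not k.startswith(common) and common:
--             common = common[:-1]
--         if not common:
--             break
--     candidates = set()
--     for i in range(1, len(common)+1):
--         if common[i-1] == '/':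
--             candidates.add(common[:i])
--     if common.endswith('/'):
--         candidates.add(common)
--     for p in sorted(candidates, key=len):
--         if not bad_key.startswith(p):
--             return p
--     return None
-- ===== SOURCE B (Python) =====
-- def _lcp(a, b):
--     # longest common prefix of two strings
--     n = min(len(a), len(b))
--     j = 0
--     while j < n and a[j] == b[j]:
--         j += 1
--     return a[:j]
--
-- def key_common_prefix_excluding(keys_good, bad_key):
--     """Return directory-like prefix p ending with '/' that covers all good keys but excludes bad_key."""
--     if not keys_good:
--         return None
--     common = keys_good[0]
--     for k in keys_good[1:]:
--         common = _lcp(common, k)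
--     d = len(_lcp(common, bad_key))
--     for i in range(d, len(common)):
--         if common[i] == '/':
--             return common[:i + 1]
--     return None
-- ===== Notes on version B (the rewrite author's own statement) =====
-- stated objective: alternative
-- what changed: A shrinks the running common prefix from the end one character at a time per key, then builds a set of all '/'-ending prefixes, sorts it by length and tests each against bad_key; B computes the common prefix with a forward char-by-char lcp scan per key and directly returns the prefix ending at the first '/' at or past the divergence point between the common prefix and bad_key, with no candidate set, no sort and no repeated startswith tests.
import Mathlib
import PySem

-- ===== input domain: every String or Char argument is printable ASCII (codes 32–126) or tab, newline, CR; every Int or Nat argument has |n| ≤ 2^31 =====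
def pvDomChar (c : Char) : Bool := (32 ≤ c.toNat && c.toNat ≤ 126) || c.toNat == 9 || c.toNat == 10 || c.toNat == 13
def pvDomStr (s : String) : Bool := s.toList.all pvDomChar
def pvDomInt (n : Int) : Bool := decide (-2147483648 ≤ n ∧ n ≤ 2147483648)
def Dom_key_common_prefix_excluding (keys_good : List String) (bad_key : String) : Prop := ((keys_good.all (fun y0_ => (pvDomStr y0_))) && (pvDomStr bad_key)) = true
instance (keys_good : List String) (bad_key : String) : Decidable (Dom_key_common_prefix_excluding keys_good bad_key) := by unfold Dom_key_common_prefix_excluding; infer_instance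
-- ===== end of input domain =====

-- B replaces A's shrink-from-the-end common-prefix loop and its build-set/sort/test candidate
-- search by per-pair char-scan lcp folds and one first-'/'-past-the-divergence-point scan.

-- ===== PORT A =====
-- while not k.startswith(common) and common: common = common[:-1]
def pvShrink (k : List Char) (c : List Char) : List Char :=
  if PySem.Chars.startswith k c = false ∧ c ≠ [] then pvShrink k c.dropLast else c
termination_by c.length
decreasing_by
  rename_i h
  have : c.length ≠ 0 := fun h0 => h.2 (List.eq_nil_of_length_eq_zero h0)
  simp [List.length_dropLast]; omega

-- for k in keys_good[1:]: … ; if not common: break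
def pvALoop (c : List Char) (ks : List String) : List Char :=
  match ks with
  | [] => c
  | k :: rest =>
      let c' := pvShrink k.toList c
      if c' = [] then c' else pvALoop c' rest

def key_common_prefix_excluding (keys_good : List String) (bad_key : String) : Option String :=
  match keys_good with
  | [] => none
  | k0 :: rest =>
    let common := pvALoop k0.toList rest
    let candidates : PySem.Set (List Char) :=
      (PySem.List.pyRange 1 ((common.length : Int) + 1) 1).foldl
        (fun s i =>
          if PySem.List.pyGet? common (i - 1) = some '/' then
            PySem.Set.add s (PySem.List.slice common none (some i))
          else s)
        PySem.Set.empty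
    let candidates :=
      if PySem.Chars.endswith common ['/'] then PySem.Set.add candidates common else candidates
    match (PySem.List.sorted candidates (fun p => p.length) false).find?
        (fun p => PySem.Chars.startswith bad_key.toList p = false) with
    | some p => some (String.ofList p)
    | none => none

-- ===== PORT B =====
-- _lcp: char-by-char scan of two strings
def pvLcp : List Char → List Char → List Char
  | a :: as, b :: bs => if a = b then a :: pvLcp as bs else []
  | _, _ => []

def key_common_prefix_excluding_alt (keys_good : List String) (bad_key : String) : Option String :=
  match keys_good with
  | [] => none
  | k0 :: rest =>
    let common := rest.foldl (fun c k => pvLcp c k.toList) k0.toList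
    let d := (pvLcp common bad_key.toList).length
    match (common.drop d).findIdx? (· = '/') with
    | some j => some (String.ofList (common.take (d + j + 1)))
    | none => none

-- ===== PRECONDITION & SPEC =====
def Spec_key_common_prefix_excluding (keys_good : List String) (bad_key : String) (out : Option String) : Prop := out = key_common_prefix_excluding_alt keys_good bad_key
instance (keys_good : List String) (bad_key : String) (out : Option String) : Decidable (Spec_key_common_prefix_excluding keys_good bad_key out) := by unfold Spec_key_common_prefix_excluding; infer_instance

-- ===== CLAIM (what is proved, stated in full; the proofs are below) =====
def Claim_equal_key_common_prefix_excluding : Prop := ∀ (keys_good : List String) (bad_key : String), Dom_key_common_prefix_excluding keys_good bad_key → Spec_key_common_prefix_excluding keys_good bad_key (key_common_prefix_excluding keys_good bad_key)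

-- ===== LEMMAS AND PROOFS =====

theorem pvLcp_prefix_left (a b : List Char) : pvLcp a b <+: a := by
  induction a generalizing b with
  | nil => simp [pvLcp]
  | cons x as ih =>
    cases b with
    | nil => simp [pvLcp]
    | cons y bs =>
      simp only [pvLcp]
      split
      · rename_i h; subst h; exact List.cons_prefix_cons.mpr ⟨rfl, ih bs⟩
      · simp

theorem pvLcp_prefix_right (a b : List Char) : pvLcp a b <+: b := by
  induction a generalizing b with
  | nil => simp [pvLcp]
  | cons x as ih =>
    cases b with
    | nil => simp [pvLcp]
    | cons y bs =>
      simp only [pvLcp]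
      split
      · rename_i h; subst h; exact List.cons_prefix_cons.mpr ⟨rfl, ih bs⟩
      · simp

theorem pvLcp_nil (b : List Char) : pvLcp [] b = [] := by cases b <;> rfl

theorem pvLcp_of_prefix {a b : List Char} (h : a <+: b) : pvLcp a b = a := by
  induction a generalizing b with
  | nil => simp [pvLcp_nil]
  | cons x as ih =>
    cases b with
    | nil => simp at h
    | cons y bs =>
      rw [List.cons_prefix_cons] at h
      simp [pvLcp, h.1, ih h.2]

theorem pvLcp_dropLast {a b : List Char} (h : ¬ a <+: b) : pvLcp a b = pvLcp a.dropLast b := by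
  induction a generalizing b with
  | nil => simp at h
  | cons x as ih =>
    cases b with
    | nil =>
      simp [pvLcp]
    | cons y bs =>
      by_cases hxy : x = y
      · subst hxy
        have has : ¬ as <+: bs := fun hp => h (List.cons_prefix_cons.mpr ⟨rfl, hp⟩)
        have hasne : as ≠ [] := by rintro rfl; exact has (by simp)
        rw [List.dropLast_cons_of_ne_nil hasne]
        simp [pvLcp, ih has]
      · cases as with
        | nil => simp [pvLcp, hxy] at h ⊢
        | cons z zs =>
          rw [List.dropLast_cons_of_ne_nil (by simp)]
          simp [pvLcp, hxy]

theorem pvShrink_eq_lcp (k c : List Char) : pvShrink k c = pvLcp c k := by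
  induction hn : c.length using Nat.strong_induction_on generalizing c with
  | _ n ih =>
  rw [pvShrink]
  by_cases hp : c <+: k
  · rw [if_neg, pvLcp_of_prefix hp]
    simp [(PySem.Chars.startswith_iff k c).mpr hp]
  · have hne : c ≠ [] := by rintro rfl; exact hp (by simp)
    rw [if_pos ⟨by rw [← Bool.not_eq_true]; exact fun hh => hp ((PySem.Chars.startswith_iff k c).mp hh), hne⟩]
    subst hn
    rw [ih c.dropLast.length (by have := List.length_pos_iff.mpr hne; simp [List.length_dropLast]; omega) c.dropLast rfl]
    exact (pvLcp_dropLast hp).symm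

theorem foldl_lcp_nil (ks : List String) : ks.foldl (fun c k => pvLcp c k.toList) [] = [] := by
  induction ks with
  | nil => rfl
  | cons k ks ih => simp [pvLcp_nil, ih]

theorem pvALoop_eq_foldl (ks : List String) (c : List Char) :
    pvALoop c ks = ks.foldl (fun c k => pvLcp c k.toList) c := by
  induction ks generalizing c with
  | nil => rfl
  | cons k ks ih =>
    simp only [pvALoop, pvShrink_eq_lcp, List.foldl_cons]
    split
    · rename_i h; rw [h, foldl_lcp_nil]
    · exact ih _

theorem pvLcp_take_le {c b : List Char} {j : Nat} (h : c.take j <+: b) :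
    min j c.length ≤ (pvLcp c b).length := by
  induction c generalizing b j with
  | nil => simp
  | cons x cs ih =>
    cases j with
    | zero => simp
    | succ j' =>
      cases b with
      | nil => simp at h
      | cons y bs =>
        rw [List.take_succ_cons, List.cons_prefix_cons] at h
        obtain ⟨rfl, h2⟩ := h
        have := ih h2
        simp only [pvLcp, if_true, List.length_cons]
        omega

theorem pvLcp_len_le (c b : List Char) : (pvLcp c b).length ≤ c.length :=
  (pvLcp_prefix_left c b).length_le

theorem pvLcp_eq_take (c b : List Char) : pvLcp c b = c.take (pvLcp c b).length :=
  List.prefix_iff_eq_take.mp (pvLcp_prefix_left c b)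

theorem take_prefix_of_le {c b : List Char} {j : Nat} (h : j ≤ (pvLcp c b).length) :
    c.take j <+: b := by
  have h1 : c.take j <+: pvLcp c b := by
    rw [pvLcp_eq_take c b]
    simpa using List.take_prefix_take_left h (l := c)
  exact h1.trans (pvLcp_prefix_right c b)

-- the candidate list A builds, by increasing slash index
def candsUpto (c : List Char) (n : Nat) : List (List Char) :=
  (List.range n).filterMap (fun i => if getElem? c i = some '/' then some (c.take (i + 1)) else none)

theorem mem_candsUpto {c : List Char} {n : Nat} {x : List Char} (h : x ∈ candsUpto c n) :
    ∃ i, i < n ∧ i < c.length ∧ getElem? c i = some '/' ∧ x = c.take (i + 1) := by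
  unfold candsUpto at h
  obtain ⟨i, hi, hx⟩ := List.mem_filterMap.mp h
  rw [List.mem_range] at hi
  by_cases hs : getElem? c i = some '/'
  · refine ⟨i, hi, ?_, hs, ?_⟩
    · exact (List.getElem?_eq_some_iff.mp hs).1
    · rw [if_pos hs] at hx; exact (Option.some.inj hx).symm
  · rw [if_neg hs] at hx; cases hx

theorem length_of_mem_candsUpto {c : List Char} {n : Nat} {x : List Char} (h : x ∈ candsUpto c n) :
    x.length ≤ n ∧ 0 < x.length := by
  obtain ⟨i, hi, hlen, _, rfl⟩ := mem_candsUpto h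
  rw [List.length_take]
  omega

theorem candsUpto_succ (c : List Char) (n : Nat) :
    candsUpto c (n + 1) = candsUpto c n ++
      (if getElem? c n = some '/' then [c.take (n + 1)] else []) := by
  unfold candsUpto
  rw [List.range_succ, List.filterMap_append]
  simp only [List.filterMap_cons, List.filterMap_nil]
  by_cases hs : getElem? c n = some '/'
  · rw [if_pos hs, if_pos hs]
  · rw [if_neg hs, if_neg hs]

theorem candsUpto_pairwise (c : List Char) (n : Nat) :
    (candsUpto c n).Pairwise (fun a b => a.length < b.length) := by
  induction n with
  | zero => simp [candsUpto]
  | succ n ih =>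
    rw [candsUpto_succ]
    apply List.pairwise_append.mpr
    refine ⟨ih, ?_, ?_⟩
    · split
      · simp
      · simp
    · intro a ha b hb
      have h1 := (length_of_mem_candsUpto ha).1
      split at hb
      · rename_i hs
        simp only [List.mem_singleton] at hb
        subst hb
        rw [List.length_take]
        have : n < c.length := (List.getElem?_eq_some_iff.mp hs).1
        omega
      · simp at hb

theorem fold_eq_candsUpto (c : List Char) :
    ((PySem.List.pyRange 1 ((c.length : Int) + 1) 1).foldl
        (fun s i =>
          if PySem.List.pyGet? c (i - 1) = some '/' then
            PySem.Set.add s (PySem.List.slice c none (some i))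
          else s)
        PySem.Set.empty) = candsUpto c c.length := by
  rw [PySem.List.pyRange_one, List.foldl_map]
  have hn : ((c.length : Int) + 1 - 1).toNat = c.length := by omega
  rw [hn]
  have step : ∀ (s : PySem.Set (List Char)) (k : Nat),
      (fun s (i : Int) =>
          if PySem.List.pyGet? c (i - 1) = some '/' then
            PySem.Set.add s (PySem.List.slice c none (some i))
          else s) s (1 + (k : Int))
      = if getElem? c k = some '/' then PySem.Set.add s (c.take (k + 1)) else s := by
    intro s k
    have h1 : (1 + (k : Int)) - 1 = (k : Int) := by omega
    have h2 : PySem.List.slice c none (some (1 + (k : Int))) = c.take (k + 1) := by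
      rw [PySem.List.slice_to c (by omega)]
      congr 1
      omega
    simp only [h1, h2, PySem.List.pyGet?_natCast]
  suffices H : ∀ n, n ≤ c.length →
      (List.range n).foldl (fun s (k : Nat) =>
        (fun s (i : Int) =>
          if PySem.List.pyGet? c (i - 1) = some '/' then
            PySem.Set.add s (PySem.List.slice c none (some i))
          else s) s (1 + (k : Int))) PySem.Set.empty = candsUpto c n by
    exact H c.length le_rfl
  intro n hn'
  induction n with
  | zero => simp [candsUpto]
  | succ n ih =>
    rw [List.range_succ, List.foldl_append, ih (by omega), List.foldl_cons, List.foldl_nil, step,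
      candsUpto_succ]
    split
    · rename_i hs
      rw [PySem.Set.add_of_not_mem]
      intro hmem
      have := (length_of_mem_candsUpto hmem).1
      rw [List.length_take] at this
      have : n < c.length := (List.getElem?_eq_some_iff.mp hs).1
      omega
    · simp

theorem endswith_mem_candsUpto {c : List Char} (h : PySem.Chars.endswith c ['/'] = true) :
    c ∈ candsUpto c c.length := by
  obtain ⟨t, rfl⟩ := (PySem.Chars.endswith_iff c ['/']).mp h
  unfold candsUpto
  apply List.mem_filterMap.mpr
  refine ⟨t.length, List.mem_range.mpr (by simp), ?_⟩
  rw [if_pos (by simp)]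
  have : t.length + 1 = (t ++ ['/']).length := by simp
  rw [this, List.take_length]

theorem find?_all_true {α : Type} {p : α → Bool} {l : List α} (h : ∀ x ∈ l, p x = true) :
    l.find? p = l.head? := by
  cases l with
  | nil => rfl
  | cons x xs => rw [List.find?_cons_of_pos (h x (by simp)), List.head?_cons]

theorem scan_head {c : List Char} : ∀ (m d : Nat), d + m = c.length →
    ((List.range' d m).filterMap
        (fun i => if getElem? c i = some '/' then some (c.take (i + 1)) else none)).head?
      = ((c.drop d).findIdx? (· = '/')).map (fun j => c.take (d + j + 1)) := by
  intro m
  induction m with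
  | zero =>
    intro d hd
    rw [Nat.add_zero] at hd
    subst hd
    simp
  | succ m ih =>
    intro d hd
    have hdlt : d < c.length := by omega
    rw [List.range'_succ, List.filterMap_cons, List.drop_eq_getElem_cons hdlt, List.findIdx?_cons]
    have hget : getElem? c d = some (getElem c d hdlt) := List.getElem?_eq_getElem hdlt
    by_cases hs : getElem c d hdlt = '/'
    · rw [hget, hs, if_pos rfl, if_pos (by simp)]
      simp
    · rw [hget, if_neg (by simpa using hs), if_neg (by simpa using hs)]
      rw [ih (d + 1) (by omega), Option.map_map]
      apply Option.map_congr
      intro j _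
      simp
      omega

theorem find_cands (c bad : List Char) :
    (candsUpto c c.length).find? (fun p => PySem.Chars.startswith bad p = false)
      = ((c.drop (pvLcp c bad).length).findIdx? (· = '/')).map
          (fun j => c.take ((pvLcp c bad).length + j + 1)) := by
  set d := (pvLcp c bad).length with hd
  have hdle : d ≤ c.length := pvLcp_len_le c bad
  unfold candsUpto
  have hsplit : List.range c.length = List.range' 0 d ++ List.range' d (c.length - d) := by
    rw [List.range_eq_range']
    have h2 := List.range'_append (s := 0) (m := d) (n := c.length - d) (step := 1)
    simp at h2
    calc List.range' 0 c.length = List.range' 0 (d + (c.length - d)) := by congr 1; omega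
      _ = _ := h2.symm
  rw [hsplit, List.filterMap_append, List.find?_append]
  have h1 : List.find? (fun p => PySem.Chars.startswith bad p = false)
      ((List.range' 0 d).filterMap
        (fun i => if getElem? c i = some '/' then some (c.take (i + 1)) else none)) = none := by
    rw [List.find?_eq_none]
    intro x hx
    obtain ⟨i, hi, hval⟩ := List.mem_filterMap.mp hx
    have hirange : i < d := by
      have := List.mem_range'_1.mp hi; omega
    by_cases hs : getElem? c i = some '/'
    · rw [if_pos hs] at hval
      obtain rfl := Option.some.inj hval
      have hpref : c.take (i + 1) <+: bad := take_prefix_of_le (by omega)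
      simp [(PySem.Chars.startswith_iff bad (c.take (i+1))).mpr hpref]
    · rw [if_neg hs] at hval; cases hval
  rw [h1, Option.none_or]
  rw [find?_all_true, scan_head (c.length - d) d (by omega)]
  intro x hx
  obtain ⟨i, hi, hval⟩ := List.mem_filterMap.mp hx
  have hirange : d ≤ i ∧ i < c.length := by
    have := List.mem_range'_1.mp hi; omega
  by_cases hs : getElem? c i = some '/'
  · rw [if_pos hs] at hval
    obtain rfl := Option.some.inj hval
    have : ¬ c.take (i + 1) <+: bad := by
      intro hpref
      have := pvLcp_take_le hpref
      omega
    simp only [decide_eq_true_eq, Bool.eq_false_iff]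
    exact fun heq => this ((PySem.Chars.startswith_iff bad _).mp heq)
  · rw [if_neg hs] at hval; cases hval

-- ===== VERDICT (by name: the statement is the Claim_ definition above) =====
theorem key_common_prefix_excluding_spec : Claim_equal_key_common_prefix_excluding := by
  intro keys_good bad_key _
  unfold Spec_key_common_prefix_excluding key_common_prefix_excluding key_common_prefix_excluding_alt
  cases keys_good with
  | nil => rfl
  | cons k0 rest =>
    simp only [pvALoop_eq_foldl]
    set c := rest.foldl (fun c k => pvLcp c k.toList) k0.toList with hc
    rw [fold_eq_candsUpto c]
    have hset : (if PySem.Chars.endswith c ['/'] then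
        PySem.Set.add (candsUpto c c.length) c else candsUpto c c.length) = candsUpto c c.length := by
      split
      · exact PySem.Set.add_of_mem (endswith_mem_candsUpto (by assumption))
      · rfl
    rw [hset]
    rw [PySem.List.sorted_eq_of_perm_of_pairwise_lt (candsUpto c c.length) (candsUpto c c.length)
      (fun p => p.length) (List.Perm.refl _) (candsUpto_pairwise c c.length)]
    rw [find_cands c bad_key.toList]
    cases (c.drop (pvLcp c bad_key.toList).length).findIdx? (· = '/') <;> simp
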